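-- pv_equiv track=rewrite | github.com/stanfordnmbl/opencap-core | Examples/checkDataForSubject.py | get_entry_with_largest_number
-- ===== SOURCE A (Python) =====
-- def get_entry_with_largest_number(lst):
--     max_entry = None
--     max_number = float('-inf')
--
--     for entry in lst:
--         # Extract the number from the string
--         try:
--             number = int(entry.split('_')[-1])
--             if number > max_number:
--                 max_number = number
--                 max_entry = entry
--         except ValueError:
--             continue
--
--     return max_entry
-- ===== SOURCE B (Python) =====
-- def get_entry_with_largest_number(lst):
--     pairs = []
--     for entry in lst:
--         try:
--             pairs.append((int(entry.split('_')[-1]), entry))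
--         except ValueError:
--             continue
--     if not pairs:
--         return None
--     return max(pairs, key=lambda p: p[0])[1]
-- ===== Notes on version B (the rewrite author's own statement) =====
-- stated objective: simpler
-- what changed: Replaces the inline running-max accumulation (two mutable variables with a float('-inf') sentinel) by a collect pass building (number, entry) pairs followed by a single max(..., key=...) selection step.
import Mathlib
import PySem

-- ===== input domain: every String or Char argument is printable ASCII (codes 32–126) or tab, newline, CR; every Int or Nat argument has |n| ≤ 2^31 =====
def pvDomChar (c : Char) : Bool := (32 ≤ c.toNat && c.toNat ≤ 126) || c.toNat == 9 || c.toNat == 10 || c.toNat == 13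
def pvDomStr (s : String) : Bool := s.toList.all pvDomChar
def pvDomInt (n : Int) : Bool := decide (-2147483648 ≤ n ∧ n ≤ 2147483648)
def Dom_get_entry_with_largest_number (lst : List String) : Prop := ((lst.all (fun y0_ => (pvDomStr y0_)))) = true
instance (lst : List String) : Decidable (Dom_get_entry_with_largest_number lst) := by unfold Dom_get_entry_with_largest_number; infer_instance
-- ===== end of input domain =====

-- B collects (number, entry) pairs first and then selects with max(key=first component); A keeps a running max inline.

-- shared helper: int(entry.split('_')[-1]); none = ValueError (split never returns [], so [-1] always hits)
def pvParse (entry : String) : Option Int :=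
  match PySem.Str.split? entry "_" with
  | none => none                                    -- unreachable: sep ≠ ""
  | some parts =>
    match PySem.List.pyGet? parts (-1) with
    | none => none                                  -- unreachable: split never returns []
    | some s => PySem.Int.ofStr? s

-- ===== PORT A =====
def get_entry_with_largest_number (lst : List String) : Option String :=
  (lst.foldl (fun (st : Option String × Option Int) entry =>
      match pvParse entry with
      | none => st                                  -- except ValueError: continue
      | some number =>
        match st.2 with
        | none => (some entry, some number)         -- number > -inf always
        | some m => if number > m then (some entry, some number) else st)
    (none, none)).1

-- ===== PORT B =====
def get_entry_with_largest_number_alt (lst : List String) : Option String :=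
  let pairs := lst.filterMap (fun entry => (pvParse entry).map (fun n => (n, entry)))
  match PySem.List.max? pairs (fun p => p.1) with
  | none => none
  | some p => some p.2

-- ===== PRECONDITION & SPEC =====
def Spec_get_entry_with_largest_number (lst : List String) (out : Option String) : Prop := out = get_entry_with_largest_number_alt lst
instance (lst : List String) (out : Option String) : Decidable (Spec_get_entry_with_largest_number lst out) := by unfold Spec_get_entry_with_largest_number; infer_instance

-- ===== CLAIM (what is proved, stated in full; the proofs are below) =====
def Claim_equal_get_entry_with_largest_number : Prop := ∀ (lst : List String), Dom_get_entry_with_largest_number lst → Spec_get_entry_with_largest_number lst (get_entry_with_largest_number lst)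

-- ===== LEMMAS AND PROOFS =====

-- B's selection step, named so the lemmas can mention max?'s folding function
def pvStep : Option (Int × String) → (Int × String) → Option (Int × String) := fun acc x =>
  match acc with | none => some x | some m => if m.1 < x.1 then some x else some m

theorem pvmax_eq (xs : List (Int × String)) :
    PySem.List.max? xs (fun p => p.1) = xs.foldl pvStep none := by
  unfold PySem.List.max?
  congr 1
  funext a x
  cases a <;> rfl

-- invariant: A's two-component state is the projection of B's running first-max accumulator
theorem pv_fold_inv (lst : List String) (acc : Option (Int × String)) :
    lst.foldl (fun (st : Option String × Option Int) entry =>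
      match pvParse entry with
      | none => st
      | some number =>
        match st.2 with
        | none => (some entry, some number)
        | some m => if number > m then (some entry, some number) else st)
      (acc.map (·.2), acc.map (·.1))
    = (((lst.filterMap (fun entry => (pvParse entry).map (fun n => (n, entry)))).foldl pvStep acc).map (·.2),
       ((lst.filterMap (fun entry => (pvParse entry).map (fun n => (n, entry)))).foldl pvStep acc).map (·.1)) := by
  induction lst generalizing acc with
  | nil => simp
  | cons e t ih =>
    simp only [List.foldl_cons, List.filterMap_cons]
    cases hp : pvParse e with
    | none => simpa using ih acc
    | some n =>
      cases acc with
      | none => simpa [pvStep] using ih (some (n, e))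
      | some m =>
        have hs : pvStep (some m) (n, e) = if m.1 < n then some (n, e) else some m := rfl
        by_cases h : m.1 < n
        · simpa [hs, h] using ih (some (n, e))
        · simpa [hs, h] using ih (some m)

-- ===== VERDICT (by name: the statement is the Claim_ definition above) =====
theorem get_entry_with_largest_number_spec : Claim_equal_get_entry_with_largest_number := by
  intro lst _
  show _ = _
  simp only [get_entry_with_largest_number, get_entry_with_largest_number_alt]
  rw [pvmax_eq]
  have h := pv_fold_inv lst none
  simp only [Option.map_none] at h
  rw [h]
  cases (lst.filterMap (fun entry => (pvParse entry).map (fun n => (n, entry)))).foldl pvStep none <;> rfl
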